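-- pv_equiv track=rewrite | github.com/bradenpan/slated-content-engine | src/generate_weekly_plan.py | splice_replacements
-- ===== SOURCE A (Python) =====
-- def splice_replacements(
--     plan: dict,
--     replacements: dict,
--     offending_post_ids: set,
--     offending_pin_ids: set,
-- ) -> dict:
--     """
--     Splice replacement blog posts and pins into the existing plan by ID.
--
--     After splicing, the plan has the same number of posts and pins with
--     the same IDs and slot assignments — only content fields change.
--
--     Args:
--         plan: The original weekly plan.
--         replacements: Output from generate_replacement_posts() with
--                       "blog_posts" and "pins" arrays.
--         offending_post_ids: Set of post_ids being replaced.
--         offending_pin_ids: Set of pin_ids being replaced.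
--
--     Returns:
--         dict: Updated plan with replacements spliced in.
--     """
--     new_plan = dict(plan)
--
--     replacement_posts = {
--         p["post_id"]: p for p in replacements.get("blog_posts", [])
--     }
--     replacement_pins = {
--         p["pin_id"]: p for p in replacements.get("pins", [])
--     }
--
--     new_plan["blog_posts"] = [
--         replacement_posts.get(post["post_id"], post)
--         if post.get("post_id") in offending_post_ids
--         else post
--         for post in plan.get("blog_posts", [])
--     ]
--
--     new_plan["pins"] = [
--         replacement_pins.get(pin["pin_id"], pin)
--         if pin.get("pin_id") in offending_pin_ids
--         else pin
--         for pin in plan.get("pins", [])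
--     ]
--
--     return new_plan
-- ===== SOURCE B (Python) =====
-- def splice_replacements(
--     plan: dict,
--     replacements: dict,
--     offending_post_ids: set,
--     offending_pin_ids: set,
-- ) -> dict:
--     """Splice replacements in from the replacement side: copy the plan's
--     lists, build an id -> [indices] map for each, then write each offending
--     replacement into every slot holding its id."""
--     new_posts = list(plan.get("blog_posts", []))
--     new_pins = list(plan.get("pins", []))
--
--     post_idx = {}
--     for i, post in enumerate(new_posts):
--         pid = post.get("post_id")
--         if pid is not None:
--             post_idx.setdefault(pid, []).append(i)
--     pin_idx = {}
--     for i, pin in enumerate(new_pins):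
--         pid = pin.get("pin_id")
--         if pid is not None:
--             pin_idx.setdefault(pid, []).append(i)
--
--     for r in replacements.get("blog_posts", []):
--         rid = r["post_id"]
--         if rid in offending_post_ids:
--             for i in post_idx.get(rid, []):
--                 new_posts[i] = r
--     for r in replacements.get("pins", []):
--         rid = r["pin_id"]
--         if rid in offending_pin_ids:
--             for i in pin_idx.get(rid, []):
--                 new_pins[i] = r
--
--     new_plan = dict(plan)
--     new_plan["blog_posts"] = new_posts
--     new_plan["pins"] = new_pins
--     return new_plan
-- ===== Notes on version B (the rewrite author's own statement) =====
-- stated objective: alternative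
-- what changed: B drives the splice from the replacement side: it shallow-copies the plan's blog_posts/pins lists, builds an id->indices map over each once, and writes each offending replacement into every slot holding its id, instead of A's building replacement-keyed dicts and rebuilding both lists by scanning the plan with per-element membership tests and lookups.
import Mathlib
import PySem

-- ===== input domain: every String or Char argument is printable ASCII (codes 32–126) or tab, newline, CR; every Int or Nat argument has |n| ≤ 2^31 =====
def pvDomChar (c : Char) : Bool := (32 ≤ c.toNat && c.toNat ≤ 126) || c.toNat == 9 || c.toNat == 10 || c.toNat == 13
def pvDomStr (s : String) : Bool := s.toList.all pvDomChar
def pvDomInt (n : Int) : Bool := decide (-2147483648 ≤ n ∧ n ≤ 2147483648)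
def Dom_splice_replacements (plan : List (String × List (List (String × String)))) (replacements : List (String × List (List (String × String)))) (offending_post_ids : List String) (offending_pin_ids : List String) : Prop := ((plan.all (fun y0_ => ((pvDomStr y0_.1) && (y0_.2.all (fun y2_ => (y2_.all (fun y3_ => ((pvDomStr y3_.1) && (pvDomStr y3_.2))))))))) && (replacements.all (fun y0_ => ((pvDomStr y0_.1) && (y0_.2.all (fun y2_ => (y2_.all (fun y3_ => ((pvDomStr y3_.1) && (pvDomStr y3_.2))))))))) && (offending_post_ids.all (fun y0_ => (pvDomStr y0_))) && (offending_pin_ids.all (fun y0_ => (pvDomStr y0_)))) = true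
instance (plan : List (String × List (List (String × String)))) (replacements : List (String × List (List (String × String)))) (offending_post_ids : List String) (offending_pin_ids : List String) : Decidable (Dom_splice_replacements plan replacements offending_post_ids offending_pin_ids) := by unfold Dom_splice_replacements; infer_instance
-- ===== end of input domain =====

-- B splices from the replacement side (copied plan lists + an id→indices map written into in place)
-- instead of A's replacement-keyed dicts scanned from the plan side; objective: alternative, not faster.

-- An inner Python dict {str: str} is an association list in insertion order (lookup = first match).
abbrev Entry := List (String × String)

-- shared dict primitives (both Pythons do `d[k] = v` / `d.get(k, dflt)`):
-- Python dict assignment: overwrite in place keeps the key's position, a new key is appended.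
def pvInsert {α : Type} (d : List (String × α)) (k : String) (v : α) : List (String × α) :=
  match d with
  | [] => [(k, v)]
  | (k', v') :: rest => if k' == k then (k, v) :: rest else (k', v') :: pvInsert rest k v

-- Python dict.get(k, dflt) on the association-list representation.
def pvGetD {α : Type} (d : List (String × α)) (k : String) (v : α) : α := (d.lookup k).getD v

-- ===== PORT A =====
-- {p[key]: p for p in rs}  (KeyError — i.e. lookup = none — is excluded by Pre_; the port skips such an entry)
def buildRep (key : String) (rs : List Entry) : List (String × Entry) :=
  rs.foldl (fun d p =>
    match p.lookup key with
    | some id => pvInsert d id p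
    | none => d) []

-- body of A's list comprehension: rep.get(post[key], post) if post.get(key) in off else post
def repPick (key : String) (off : List String) (rep : List (String × Entry)) (post : Entry) : Entry :=
  match post.lookup key with
  | some id => if off.contains id then pvGetD rep id post else post
  | none => post

def splice_replacements (plan : List (String × List (List (String × String)))) (replacements : List (String × List (List (String × String)))) (offending_post_ids : List String) (offending_pin_ids : List String) : List (String × List (List (String × String))) :=
  let replacement_posts := buildRep "post_id" (pvGetD replacements "blog_posts" [])
  let replacement_pins := buildRep "pin_id" (pvGetD replacements "pins" [])
  let new_posts := (pvGetD plan "blog_posts" []).map (repPick "post_id" offending_post_ids replacement_posts)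
  let new_pins := (pvGetD plan "pins" []).map (repPick "pin_id" offending_pin_ids replacement_pins)
  pvInsert (pvInsert plan "blog_posts" new_posts) "pins" new_pins

-- ===== PORT B =====
-- id → list of the indices holding it (dict of `setdefault(pid, []).append(i)` over enumerate)
def buildIdx (key : String) (xs : List Entry) : List (String × List Nat) :=
  xs.zipIdx.foldl (fun d pi =>
    match pi.1.lookup key with
    | some id => pvInsert d id (pvGetD d id [] ++ [pi.2])
    | none => d) []

-- for r in rs: if r[key] in off: for i in idx.get(r[key], []): arr[i] = r
-- (r[key] raising KeyError — lookup = none — is excluded by Pre_; the port skips such an entry)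
def applyReps (key : String) (off : List String) (idx : List (String × List Nat)) (rs : List Entry) (arr : List Entry) : List Entry :=
  rs.foldl (fun arr r =>
    match r.lookup key with
    | some rid =>
        if off.contains rid then (pvGetD idx rid []).foldl (fun a i => a.set i r) arr
        else arr
    | none => arr) arr

def splice_replacements_alt (plan : List (String × List (List (String × String)))) (replacements : List (String × List (List (String × String)))) (offending_post_ids : List String) (offending_pin_ids : List String) : List (String × List (List (String × String))) :=
  let posts := pvGetD plan "blog_posts" []
  let pins := pvGetD plan "pins" []
  let new_posts := applyReps "post_id" offending_post_ids (buildIdx "post_id" posts) (pvGetD replacements "blog_posts" []) posts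
  let new_pins := applyReps "pin_id" offending_pin_ids (buildIdx "pin_id" pins) (pvGetD replacements "pins" []) pins
  pvInsert (pvInsert plan "blog_posts" new_posts) "pins" new_pins

-- ===== PRECONDITION & SPEC =====
-- Pre_ excludes exactly the inputs on which the Python A raises KeyError: a replacement blog post
-- without a "post_id" key, or a replacement pin without a "pin_id" key (B raises there too).
def Pre_splice_replacements (plan : List (String × List (List (String × String)))) (replacements : List (String × List (List (String × String)))) (offending_post_ids : List String) (offending_pin_ids : List String) : Prop :=
  (∀ r ∈ pvGetD replacements "blog_posts" ([] : List Entry), (r.lookup "post_id").isSome = true) ∧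
  (∀ r ∈ pvGetD replacements "pins" ([] : List Entry), (r.lookup "pin_id").isSome = true)
instance (plan : List (String × List (List (String × String)))) (replacements : List (String × List (List (String × String)))) (offending_post_ids : List String) (offending_pin_ids : List String) : Decidable (Pre_splice_replacements plan replacements offending_post_ids offending_pin_ids) := by unfold Pre_splice_replacements; infer_instance

def pvWitness_splice_replacements : (List (String × List (List (String × String)))) × (List (String × List (List (String × String)))) × List String × List String :=
  ([("blog_posts", [[("post_id", "a"), ("title", "x")], [("post_id", "b")]]), ("pins", [[("pin_id", "a")]])],
   [("blog_posts", [[("post_id", "a"), ("title", "y")]]), ("pins", [])],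
   ["a"], ["b"])

def Spec_splice_replacements (plan : List (String × List (List (String × String)))) (replacements : List (String × List (List (String × String)))) (offending_post_ids : List String) (offending_pin_ids : List String) (out : List (String × List (List (String × String)))) : Prop := out = splice_replacements_alt plan replacements offending_post_ids offending_pin_ids
instance (plan : List (String × List (List (String × String)))) (replacements : List (String × List (List (String × String)))) (offending_post_ids : List String) (offending_pin_ids : List String) (out : List (String × List (List (String × String)))) : Decidable (Spec_splice_replacements plan replacements offending_post_ids offending_pin_ids out) := by unfold Spec_splice_replacements; infer_instance

-- ===== CLAIM (what is proved, stated in full; the proofs are below) =====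
def Claim_equal_splice_replacements : Prop := ∀ (plan : List (String × List (List (String × String)))) (replacements : List (String × List (List (String × String)))) (offending_post_ids : List String) (offending_pin_ids : List String), Dom_splice_replacements plan replacements offending_post_ids offending_pin_ids → Pre_splice_replacements plan replacements offending_post_ids offending_pin_ids → Spec_splice_replacements plan replacements offending_post_ids offending_pin_ids (splice_replacements plan replacements offending_post_ids offending_pin_ids)

-- ===== LEMMAS AND PROOFS =====

theorem lookup_pvInsert {α : Type} (d : List (String × α)) (k k' : String) (v : α) :
    (pvInsert d k v).lookup k' = if k' == k then some v else d.lookup k' := by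
  induction d with
  | nil => cases hbe : k' == k <;> simp [pvInsert, List.lookup, hbe]
  | cons kv rest ih =>
    obtain ⟨k0, v0⟩ := kv
    by_cases h0 : k0 = k
    · subst h0
      simp only [pvInsert, BEq.rfl, if_true]
      cases hbe : k' == k0 <;> simp [List.lookup, hbe]
    · have hbk : (k0 == k) = false := beq_eq_false_iff_ne.mpr h0
      simp only [pvInsert, hbk, Bool.false_eq_true, if_false]
      cases hbe : k' == k0
      · simp [List.lookup, hbe, ih]
      · have hk' : k' = k0 := beq_iff_eq.mp hbe
        subst hk'
        simp [List.lookup, hbe, hbk]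

-- the indices j with xs[j] carrying id under key, in order
def idxJ (key id : String) (l : List (Entry × Nat)) : List Nat :=
  l.filterMap (fun pi => if pi.1.lookup key = some id then some pi.2 else none)

theorem buildIdx_aux (key id : String) (l : List (Entry × Nat)) (d0 : List (String × List Nat)) :
    pvGetD (l.foldl (fun d pi =>
      match pi.1.lookup key with
      | some id => pvInsert d id (pvGetD d id [] ++ [pi.2])
      | none => d) d0) id []
    = pvGetD d0 id [] ++ idxJ key id l := by
  induction l generalizing d0 with
  | nil => simp [idxJ]
  | cons pi t ih =>
    cases h : pi.1.lookup key with
    | none => simp [List.foldl_cons, h, ih, idxJ, List.filterMap_cons]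
    | some id0 =>
      simp only [List.foldl_cons, h]
      rw [ih]
      by_cases hid : id = id0
      · subst hid
        simp [idxJ, List.filterMap_cons, h, pvGetD, lookup_pvInsert]
      · have hlk : ∀ w : List Nat, (pvInsert d0 id0 w).lookup id = d0.lookup id := by
          intro w
          rw [lookup_pvInsert]
          simp [beq_eq_false_iff_ne.mpr hid]
        simp only [idxJ, List.filterMap_cons, h, Option.some.injEq]
        simp [pvGetD, hlk, idxJ, Ne.symm hid]

theorem buildIdx_getD (key id : String) (xs : List Entry) :
    pvGetD (buildIdx key xs) id [] = idxJ key id xs.zipIdx := by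
  rw [buildIdx, buildIdx_aux]
  simp [pvGetD, List.lookup]

theorem mem_idxJ (key id : String) (xs : List Entry) (j : Nat) :
    j ∈ idxJ key id xs.zipIdx ↔ ∃ p, xs[j]? = some p ∧ p.lookup key = some id := by
  simp only [idxJ, List.mem_filterMap]
  constructor
  · rintro ⟨⟨p, i⟩, hmem, hif⟩
    by_cases h : p.lookup key = some id
    · simp only [h, if_true, Option.some.injEq] at hif
      subst hif
      exact ⟨p, (List.mk_mem_zipIdx_iff_getElem?).mp hmem, h⟩
    · simp [h] at hif
  · rintro ⟨p, hget, hk⟩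
    exact ⟨(p, j), (List.mk_mem_zipIdx_iff_getElem?).mpr hget, by simp [hk]⟩

theorem foldl_set_length {α : Type} (l : List Nat) (arr : List α) (r : α) :
    (l.foldl (fun a i => a.set i r) arr).length = arr.length := by
  induction l generalizing arr with
  | nil => rfl
  | cons i t ih => simp [List.foldl_cons, ih]

theorem foldl_set_getElem? {α : Type} (l : List Nat) (arr : List α) (r : α) (j : Nat)
    (hj : j < arr.length) :
    (l.foldl (fun a i => a.set i r) arr)[j]? = if j ∈ l then some r else arr[j]? := by
  induction l generalizing arr with
  | nil => simp
  | cons i t ih =>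
    simp only [List.foldl_cons, List.mem_cons]
    rw [ih (arr.set i r) (by simpa using hj)]
    by_cases hjt : j ∈ t
    · simp [hjt]
    · by_cases hji : j = i
      · subst hji
        simp [hjt, List.getElem?_set, hj]
      · simp [hjt, hji, List.getElem?_set, Ne.symm hji]

theorem splice_step (key : String) (off : List String) (d : List (String × Entry))
    (xs : List Entry) (r : Entry) (rid : String) (hrid : r.lookup key = some rid) :
    (match r.lookup key with
     | some rid' =>
         if off.contains rid' then
           (pvGetD (buildIdx key xs) rid' []).foldl (fun a i => a.set i r)
             (xs.map (repPick key off d))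
         else xs.map (repPick key off d)
     | none => xs.map (repPick key off d))
    = xs.map (repPick key off (pvInsert d rid r)) := by
  rw [hrid]
  by_cases hoff : off.contains rid
  · simp only [hoff, if_true]
    rw [buildIdx_getD]
    apply List.ext_getElem?
    intro j
    by_cases hjl : j < xs.length
    · rw [foldl_set_getElem? _ _ _ _ (by simpa using hjl)]
      obtain ⟨p, hp⟩ : ∃ p, xs[j]? = some p :=
        ⟨xs[j], List.getElem?_eq_getElem hjl⟩
      by_cases hmem : j ∈ idxJ key rid xs.zipIdx
      · obtain ⟨p', hp', hk'⟩ := (mem_idxJ key rid xs j).mp hmem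
        rw [hp] at hp'
        obtain rfl : p = p' := by injection hp'
        have hoffm : rid ∈ off := by simpa using hoff
        simp only [hmem, if_true, List.getElem?_map, hp, Option.map_some]
        simp [repPick, hk', hoff, hoffm, pvGetD, lookup_pvInsert]
      · simp only [hmem, if_false, List.getElem?_map, hp, Option.map_some]
        congr 1
        cases hk : p.lookup key with
        | none => simp [repPick, hk]
        | some id =>
          have hne : id ≠ rid := by
            rintro rfl
            exact hmem ((mem_idxJ key id xs j).mpr ⟨p, hp, hk⟩)
          simp [repPick, hk, pvGetD, lookup_pvInsert, hne]
    · have h1 : xs.length ≤ j := Nat.le_of_not_lt hjl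
      rw [List.getElem?_eq_none (by simpa [foldl_set_length] using h1),
        List.getElem?_eq_none (by simpa using h1)]
  · simp only [hoff, if_false]
    apply List.map_congr_left
    intro p _
    cases hk : p.lookup key with
    | none => simp [repPick, hk]
    | some id =>
      by_cases hco : off.contains id
      · have hne : id ≠ rid := by rintro rfl; exact hoff hco
        simp [repPick, hk, hco, pvGetD, lookup_pvInsert, hne]
      · have hm : id ∉ off := by simpa using hco
        simp [repPick, hk, hm]

theorem splice_core (key : String) (off : List String) (rs xs : List Entry)
    (h : ∀ r ∈ rs, (r.lookup key).isSome = true) :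
    applyReps key off (buildIdx key xs) rs xs = xs.map (repPick key off (buildRep key rs)) := by
  induction rs using List.reverseRecOn with
  | nil =>
    simp only [applyReps, List.foldl_nil, buildRep]
    rw [List.map_congr_left (g := id) ?_, List.map_id]
    intro p _
    cases hk : p.lookup key with
    | none => simp [repPick, hk]
    | some id => simp [repPick, hk, pvGetD, List.lookup]
  | append_singleton rs r ih =>
    obtain ⟨rid, hrid⟩ : ∃ rid, r.lookup key = some rid := by
      have := h r (by simp)
      cases hk : r.lookup key with
      | none => rw [hk] at this; simp at this
      | some rid => exact ⟨rid, rfl⟩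
    have hrs : ∀ r' ∈ rs, (r'.lookup key).isSome = true := fun r' hr' => h r' (by simp [hr'])
    simp only [applyReps, List.foldl_append, List.foldl_cons, List.foldl_nil] at *
    rw [ih hrs]
    have hbuild : buildRep key (rs ++ [r]) = pvInsert (buildRep key rs) rid r := by
      simp [buildRep, List.foldl_append, hrid]
    rw [hbuild, ← splice_step key off (buildRep key rs) xs r rid hrid]

-- ===== VERDICT (by name: the statement is the Claim_ definition above) =====
theorem splice_replacements_spec : Claim_equal_splice_replacements := by
  intro plan replacements offp offn _hdom hpre
  unfold Spec_splice_replacements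
  dsimp only [splice_replacements, splice_replacements_alt]
  rw [splice_core "post_id" offp _ _ hpre.1, splice_core "pin_id" offn _ _ hpre.2]
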